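-- pv_equiv track=rewrite | github.com/sabeenlohawala/64120-final-project | likelihood_model.py | num_seq_in_h3
-- ===== SOURCE A (Python) =====
-- def num_seq_in_h3(seq_len):
--     """
--     Calculates the number of possible sequences by hypothesis 3 od the specified sequence length
--     Precondition: the sequence must be possible by hypothesis 3
--
--     Input
--     ------
--     seq_len: The length of the sequence
--
--     Returns
--     ------
--     the number of possible sequences
--     """
--     num_cards_per_suit = memoize_num_cards_per_suit()
--
--     num_selected_per_suit = [min(seq_len,13),max(seq_len-13,0),0]
--     total = 0
--     while num_selected_per_suit[0] > 0:
--         temp_sum = 4*num_cards_per_suit[num_selected_per_suit[0]]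
--         if num_selected_per_suit[1] > 0:
--             temp_sum *= 3*num_cards_per_suit[num_selected_per_suit[1]]
--         if num_selected_per_suit[2] > 0:
--             temp_sum *= 2*num_cards_per_suit[num_selected_per_suit[2]]
--         total += temp_sum
--         num_selected_per_suit[0] -= 1
--         if num_selected_per_suit[1] < 13:
--             num_selected_per_suit[1] += 1
--         else:
--             num_selected_per_suit[2] += 1
--     return total
--
-- def memoize_num_cards_per_suit():
--     memo = {0:1}
--     i = 1
--     for val in range(13,0,-1):
--         memo[i] = memo[i-1] * val
--         i += 1
--     return memo
-- ===== SOURCE B (Python) =====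
-- def num_seq_in_h3(seq_len):
--     # B decomposes the total by how many suits the sequence touches:
--     #   one suit:    4 * F[n]                     (only when 1 <= n <= 13)
--     #   two suits:   12 * conv(n)                 (ordered pair of distinct suits: 4*3)
--     #   three suits: 24 * F[13] * conv(n - 13)    (4*3*2; the middle suit is exhausted)
--     # where F[k] = 13*12*...*(13-k+1) and conv(m) = sum F[a]*F[m-a] over 1<=a,m-a<=13.
--     F = [1]
--     for v in range(13, 0, -1):
--         F.append(F[-1] * v)
--
--     def conv(m):
--         return sum(F[a] * F[m - a] for a in range(max(1, m - 13), min(13, m - 1) + 1))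
--
--     one = 4 * F[seq_len] if 0 < seq_len <= 13 else 0
--     return one + 12 * conv(seq_len) + 24 * F[13] * conv(seq_len - 13)
-- ===== Notes on version B (the rewrite author's own statement) =====
-- stated objective: alternative
-- what changed: B abandons A's while-loop state machine entirely: it partitions the count by how many suits the sequence touches and computes each part in closed form from a cumulative falling-factorial table -- 4*F[n] for one suit, 12*conv(n) for two, 24*F[13]*conv(n-13) for three, where conv is a symmetric convolution of the table with itself.
-- outside the precondition, e.g. on num_seq_in_h3(27): A raises KeyError, B returns 49553595881936419553280000
import Mathlib
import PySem

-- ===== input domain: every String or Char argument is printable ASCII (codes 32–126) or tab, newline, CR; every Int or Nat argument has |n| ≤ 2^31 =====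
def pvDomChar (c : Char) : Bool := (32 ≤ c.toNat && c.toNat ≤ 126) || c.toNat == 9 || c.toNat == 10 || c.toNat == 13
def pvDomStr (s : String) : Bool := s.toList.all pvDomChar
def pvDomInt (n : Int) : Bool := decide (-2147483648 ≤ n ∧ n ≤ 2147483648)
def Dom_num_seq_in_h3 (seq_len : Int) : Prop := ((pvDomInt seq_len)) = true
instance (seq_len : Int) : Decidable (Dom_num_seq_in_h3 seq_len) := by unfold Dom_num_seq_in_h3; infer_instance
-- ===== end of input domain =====

-- B replaces A's while-loop state machine by a closed-form decomposition of the count by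
-- number of suits used (one / two / three), each part read off a cumulative
-- falling-factorial table (objective: alternative). Equivalence proved on Pre_ (seq_len ≤ 26,
-- where A does not raise KeyError).

-- ===== PORT A =====
-- memoize_num_cards_per_suit: memo = {0:1}; for val in range(13,0,-1): memo[i] = memo[i-1]*val; i += 1
def memoize_num_cards_per_suit : PySem.Dict Int Int :=
  ((PySem.List.pyRange 13 0 (-1)).foldl
    (fun (st : PySem.Dict Int Int × Int) val =>
      (st.1.insert st.2 (st.1.getD (st.2 - 1) 0 * val), st.2 + 1))
    ((PySem.Dict.empty).insert 0 1, 1)).1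

-- the while loop; fuel = initial a.toNat (a decreases by 1 each pass, loop runs while a > 0).
-- memo lookups use getD 0; under Pre_ every key looked up is present, so this is exact there.
def h3Loop (memo : PySem.Dict Int Int) : Nat → Int → Int → Int → Int → Int
  | 0, _, _, _, total => total
  | fuel + 1, a, b, c, total =>
    if a > 0 then
      let t := 4 * memo.getD a 0
      let t := if b > 0 then t * (3 * memo.getD b 0) else t
      let t := if c > 0 then t * (2 * memo.getD c 0) else t
      if b < 13 then h3Loop memo fuel (a - 1) (b + 1) c (total + t)
      else h3Loop memo fuel (a - 1) b (c + 1) (total + t)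
    else total

def num_seq_in_h3 (seq_len : Int) : Int :=
  let memo := memoize_num_cards_per_suit
  let a := min seq_len 13
  let b := max (seq_len - 13) 0
  h3Loop memo a.toNat a b 0 0

-- ===== PORT B =====
-- F = [1]; for v in range(13,0,-1): F.append(F[-1]*v)
def ffTable : List Int :=
  (PySem.List.pyRange 13 0 (-1)).foldl
    (fun F v => F ++ [PySem.List.pyGetD F (-1) 0 * v]) [1]

-- conv(m) = sum(F[a]*F[m-a] for a in range(max(1,m-13), min(13,m-1)+1));
-- every index read is in 0..13, so pyGetD is exact here.
def convB (F : List Int) (m : Int) : Int :=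
  (PySem.List.pyRange (max 1 (m - 13)) (min 13 (m - 1) + 1) 1).foldl
    (fun s a => s + PySem.List.pyGetD F a 0 * PySem.List.pyGetD F (m - a) 0) 0

def num_seq_in_h3_alt (seq_len : Int) : Int :=
  let F := ffTable
  let one := if 0 < seq_len ∧ seq_len ≤ 13 then 4 * PySem.List.pyGetD F seq_len 0 else 0
  one + 12 * convB F seq_len + 24 * PySem.List.pyGetD F 13 0 * convB F (seq_len - 13)

-- ===== PRECONDITION & SPEC =====
-- Pre_ excludes seq_len ≥ 27, where A raises KeyError (its memo has keys 0..13 only and the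
-- second suit's initial count seq_len-13 ≥ 14 is looked up on the first iteration).
def Pre_num_seq_in_h3 (seq_len : Int) : Prop := seq_len ≤ 26
instance (seq_len : Int) : Decidable (Pre_num_seq_in_h3 seq_len) := by unfold Pre_num_seq_in_h3; infer_instance
def pvWitness_num_seq_in_h3 : Int := (20)

def Spec_num_seq_in_h3 (seq_len : Int) (out : Int) : Prop := out = num_seq_in_h3_alt seq_len
instance (seq_len : Int) (out : Int) : Decidable (Spec_num_seq_in_h3 seq_len out) := by unfold Spec_num_seq_in_h3; infer_instance

-- ===== CLAIM (what is proved, stated in full; the proofs are below) =====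
def Claim_equal_num_seq_in_h3 : Prop := ∀ (seq_len : Int), Dom_num_seq_in_h3 seq_len → Pre_num_seq_in_h3 seq_len → Spec_num_seq_in_h3 seq_len (num_seq_in_h3 seq_len)

-- ===== LEMMAS AND PROOFS =====
-- nonpositive seq_len: both programs return 0
lemma numA_nonpos (n : Int) (h : n ≤ 0) : num_seq_in_h3 n = 0 := by
  have h1 : (min n 13).toNat = 0 := by omega
  simp [num_seq_in_h3, h1, h3Loop]

lemma convB_empty (F : List Int) (m : Int) (h : m ≤ 1) : convB F m = 0 := by
  have : PySem.List.pyRange (max 1 (m - 13)) (min 13 (m - 1) + 1) 1 = [] :=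
    PySem.List.pyRange_one_eq_nil (by omega)
  simp [convB, this]

lemma numB_nonpos (n : Int) (h : n ≤ 0) : num_seq_in_h3_alt n = 0 := by
  have hg : ¬ (0 < n ∧ n ≤ 13) := by omega
  simp [num_seq_in_h3_alt, hg, convB_empty _ n (by omega), convB_empty _ (n - 13) (by omega)]

-- ===== VERDICT (by name: the statement is the Claim_ definition above) =====
theorem num_seq_in_h3_spec : Claim_equal_num_seq_in_h3 := by
  intro n _ hpre
  unfold Spec_num_seq_in_h3
  by_cases h : n ≤ 0
  · rw [numA_nonpos n h, numB_nonpos n h]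
  · unfold Pre_num_seq_in_h3 at hpre
    have h1 : 1 ≤ n := by omega
    interval_cases n <;> decide
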